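-- pv_equiv track=rewrite | github.com/ppl-03/price-scraper-rencanakan-api | api/mitra10/location_parser.py | _is_valid_location_name
-- ===== SOURCE A (Python) =====
-- def _is_valid_location_name(name: str) -> bool:
--     if not name or len(name.strip()) < 3:
--         return False
--
--     exclude_terms = [
--         'select', 'choose', 'option', 'menu', 'close', 'search', 'filter',
--         'dispenser', 'portable', 'category', 'product', 'brand', 'promo'
--     ]
--     name_lower = name.lower()
--
--     for term in exclude_terms:
--         if term in name_lower:
--             return False
--
--     return True
-- ===== SOURCE B (Python) =====
-- _EXCLUDE_TERMS = (
--     'select', 'choose', 'option', 'menu', 'close', 'search', 'filter',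
--     'dispenser', 'portable', 'category', 'product', 'brand', 'promo'
-- )
--
--
-- def _is_valid_location_name(name: str) -> bool:
--     if not name or len(name.strip()) < 3:
--         return False
--     s = name.lower()
--     # position-major scan: walk the name once and ask, at each position,
--     # whether any exclude term starts there
--     return not any(
--         s.startswith(t, i) for i in range(len(s)) for t in _EXCLUDE_TERMS
--     )
-- ===== Notes on version B (the rewrite author's own statement) =====
-- stated objective: alternative
-- what changed: Replaces A's term-major loop (one full substring scan of the name per exclude term) by a single position-major scan of the lowered name that checks at each index whether any exclude term starts there.
import Mathlib
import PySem

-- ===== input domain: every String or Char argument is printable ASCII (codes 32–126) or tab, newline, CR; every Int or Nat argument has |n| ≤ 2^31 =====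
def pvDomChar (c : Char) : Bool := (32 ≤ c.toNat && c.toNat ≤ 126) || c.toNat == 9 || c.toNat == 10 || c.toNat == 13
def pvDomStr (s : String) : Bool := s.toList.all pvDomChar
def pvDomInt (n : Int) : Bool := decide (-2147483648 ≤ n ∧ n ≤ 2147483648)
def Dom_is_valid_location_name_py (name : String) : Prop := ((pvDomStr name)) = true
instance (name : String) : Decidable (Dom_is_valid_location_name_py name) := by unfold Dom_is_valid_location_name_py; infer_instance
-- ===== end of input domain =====

-- B replaces A's term-major loop by one position-major scan of the lowered name (alternative, same cost).

-- ===== PORT A =====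
def excludeTermsA : List String :=
  ["select", "choose", "option", "menu", "close", "search", "filter",
   "dispenser", "portable", "category", "product", "brand", "promo"]

-- A's for-loop with early return, as structural recursion over the term list
def checkTermsA : List String → String → Bool
  | [], _ => true
  | t :: ts, s => if PySem.Str.isIn t s then false else checkTermsA ts s

def is_valid_location_name_py (name : String) : Bool :=
  if name == "" || PySem.Str.len (PySem.Str.strip name) < 3 then false
  else
    checkTermsA excludeTermsA (PySem.Str.lower name)

-- ===== PORT B =====
def excludeTermsB : List (List Char) :=
  ["select".toList, "choose".toList, "option".toList, "menu".toList, "close".toList,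
   "search".toList, "filter".toList, "dispenser".toList, "portable".toList,
   "category".toList, "product".toList, "brand".toList, "promo".toList]

def is_valid_location_name_py_alt (name : String) : Bool :=
  if name == "" || PySem.Str.len (PySem.Str.strip name) < 3 then false
  else
    let s := (PySem.Str.lower name).toList
    -- not any(s.startswith(t, i) for i in range(len(s)) for t in terms)
    !((List.range s.length).any (fun i =>
        excludeTermsB.any (fun t => PySem.Chars.startswith (s.drop i) t)))

-- ===== PRECONDITION & SPEC =====
def Spec_is_valid_location_name_py (name : String) (out : Bool) : Prop := out = is_valid_location_name_py_alt name
instance (name : String) (out : Bool) : Decidable (Spec_is_valid_location_name_py name out) := by unfold Spec_is_valid_location_name_py; infer_instance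

-- ===== CLAIM (what is proved, stated in full; the proofs are below) =====
def Claim_equal_is_valid_location_name_py : Prop := ∀ (name : String), Dom_is_valid_location_name_py name → Spec_is_valid_location_name_py name (is_valid_location_name_py name)

-- ===== LEMMAS AND PROOFS =====

-- A's early-return loop is the negation of an 'any' over the terms
theorem checkTermsA_eq (ts : List String) (s : String) :
    checkTermsA ts s = !(ts.any (fun t => PySem.Str.isIn t s)) := by
  induction ts with
  | nil => rfl
  | cons t ts ih => simp only [checkTermsA, ih, List.any_cons]; split_ifs <;> simp_all

-- a nonempty pattern occurs in l iff it starts at some index < l.length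
theorem isIn_eq_any_startswith (t l : List Char) (ht : t ≠ []) :
    PySem.Chars.isIn t l =
      (List.range l.length).any (fun i => PySem.Chars.startswith (l.drop i) t) := by
  rcases h : PySem.Chars.isIn t l with _ | _
  · rw [PySem.Chars.isIn_eq_false_iff] at h
    symm
    simp only [List.any_eq_false, List.mem_range]
    intro i _
    rw [Bool.not_eq_true, ← Bool.not_eq_true, PySem.Chars.startswith_iff]
    intro hp
    exact h (hp.isInfix.trans (List.drop_suffix i l).isInfix)
  · symm
    rw [← PySem.Chars.exists_prefix_drop_iff_isIn] at h
    obtain ⟨j, hj⟩ := h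
    have hjl : j < l.length := by
      by_contra hge
      rw [List.drop_eq_nil_of_le (by omega)] at hj
      exact ht (List.prefix_nil.mp hj)
    simp only [List.any_eq_true, List.mem_range]
    exact ⟨j, hjl, (PySem.Chars.startswith_iff _ _).mpr hj⟩

-- pointwise-equal predicates give equal 'any's
theorem any_congr_mem {α : Type} (l : List α) (f g : α → Bool)
    (h : ∀ a ∈ l, f a = g a) : l.any f = l.any g := by
  induction l with
  | nil => rfl
  | cons a l ih =>
    simp only [List.any_cons, h a (List.mem_cons_self), ih (fun b hb => h b (List.mem_cons_of_mem a hb))]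

-- swap the two 'any's (finite ∃ commute)
theorem any_swap {α β : Type} (xs : List α) (ys : List β) (p : α → β → Bool) :
    xs.any (fun a => ys.any (fun b => p a b)) = ys.any (fun b => xs.any (fun a => p a b)) := by
  rw [Bool.eq_iff_iff]
  simp only [List.any_eq_true]
  tauto

-- ===== VERDICT (by name: the statement is the Claim_ definition above) =====
theorem is_valid_location_name_py_spec : Claim_equal_is_valid_location_name_py := by
  intro name _
  unfold Spec_is_valid_location_name_py is_valid_location_name_py is_valid_location_name_py_alt
  split
  · rfl
  · rw [checkTermsA_eq]
    congr 1
    rw [any_swap]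
    have step1 : excludeTermsA.any (fun t => PySem.Str.isIn t (PySem.Str.lower name)) =
        excludeTermsB.any (fun t => PySem.Chars.isIn t (PySem.Str.lower name).toList) := by
      simp [excludeTermsA, excludeTermsB, PySem.Str.isIn]
    rw [step1]
    exact any_congr_mem _ _ _ (fun t ht => by
      fin_cases ht <;> exact isIn_eq_any_startswith _ _ (by decide))
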